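-- pv_equiv track=rewrite | github.com/michaelrbock/leet-code | python/game-of-life.py | neighborhood_sum
-- ===== SOURCE A (Python) =====
-- DELTA = [-1, 0, 1]
--
-- def neighborhood_sum(row, col, board):
--   total = 0
--   for dy in DELTA:
--     for dx in DELTA:
--       new_row = row + dy
--       new_col = col + dx
--       if new_row >= 0 and new_row < len(
--           board) and new_col >= 0 and new_col < len(board[0]):
--         total += board[new_row][new_col]
--   return total
-- ===== SOURCE B (Python) =====
-- def neighborhood_sum(row, col, board):
--   if not board:
--     return 0
--   r0 = max(0, row - 1)
--   r1 = max(0, min(len(board), row + 2))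
--   c0 = max(0, col - 1)
--   c1 = max(0, min(len(board[0]), col + 2))
--   return sum(sum(r[c0:c1]) for r in board[r0:r1])
-- ===== Notes on version B (the rewrite author's own statement) =====
-- stated objective: simpler
-- what changed: Replaced the nested delta loops with a per-cell four-way bounds test by computing clamped window bounds once and summing row slices of the pre-clamped 3x3 rectangle.
import Mathlib
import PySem

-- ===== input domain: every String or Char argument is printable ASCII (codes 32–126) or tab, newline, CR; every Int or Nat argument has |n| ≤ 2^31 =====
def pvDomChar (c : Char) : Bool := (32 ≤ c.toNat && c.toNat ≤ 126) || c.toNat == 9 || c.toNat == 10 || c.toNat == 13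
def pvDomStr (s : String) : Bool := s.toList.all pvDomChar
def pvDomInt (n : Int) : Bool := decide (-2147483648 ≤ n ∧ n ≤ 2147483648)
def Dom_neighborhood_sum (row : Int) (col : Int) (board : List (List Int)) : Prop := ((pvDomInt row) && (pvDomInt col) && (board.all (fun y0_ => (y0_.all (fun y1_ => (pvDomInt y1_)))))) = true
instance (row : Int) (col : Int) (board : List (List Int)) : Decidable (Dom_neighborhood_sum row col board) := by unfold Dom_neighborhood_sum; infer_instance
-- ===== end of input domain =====

-- B replaces A's nested delta loops with a per-cell bounds test by clamped window
-- bounds and a sum over row slices of the pre-clamped rectangle (objective: simpler).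


-- ===== PORT A =====
def DELTA : List Int := [-1, 0, 1]

-- board[new_row][new_col] is ported with pyGetD; inside Pre_ every accessed index is in
-- range, so the default is never used (Python raises IndexError exactly outside Pre_).
-- board[0] is evaluated only after new_row < len(board) holds, so headD [] is exact there.
def neighborhood_sum (row : Int) (col : Int) (board : List (List Int)) : Int :=
  DELTA.foldl (fun total dy =>
    DELTA.foldl (fun total dx =>
      let new_row := row + dy
      let new_col := col + dx
      if 0 ≤ new_row ∧ new_row < (board.length : Int) ∧
          0 ≤ new_col ∧ new_col < ((board.headD []).length : Int) then
        total + PySem.List.pyGetD (PySem.List.pyGetD board new_row []) new_col 0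
      else total) total) 0

-- ===== PORT B =====
def neighborhood_sum_alt (row : Int) (col : Int) (board : List (List Int)) : Int :=
  if board = [] then 0
  else
    let r0 := max 0 (row - 1)
    let r1 := max 0 (min (board.length : Int) (row + 2))
    let c0 := max 0 (col - 1)
    let c1 := max 0 (min ((board.headD []).length : Int) (col + 2))
    ((PySem.List.slice board (some r0) (some r1)).map
      (fun r => (PySem.List.slice r (some c0) (some c1)).sum)).sum

-- ===== PRECONDITION & SPEC =====
-- A raises IndexError exactly when some row of the 3x3 window is shorter than a column
-- the (len(board[0])-based) bounds test admits; Pre_ excludes exactly those ragged inputs.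
def Pre_neighborhood_sum (row : Int) (col : Int) (board : List (List Int)) : Prop :=
  ∀ r ∈ PySem.List.pyRange (max 0 (row - 1)) (min (board.length : Int) (row + 2)) 1,
    min ((board.headD []).length : Int) (col + 2) ≤
      max (max 0 (col - 1)) ((PySem.List.pyGetD board r []).length : Int)
instance (row : Int) (col : Int) (board : List (List Int)) : Decidable (Pre_neighborhood_sum row col board) := by unfold Pre_neighborhood_sum; infer_instance

def pvWitness_neighborhood_sum : Int × Int × List (List Int) := (0, 0, [[1, 2], [3, 4]])


def Spec_neighborhood_sum (row : Int) (col : Int) (board : List (List Int)) (out : Int) : Prop := out = neighborhood_sum_alt row col board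
instance (row : Int) (col : Int) (board : List (List Int)) (out : Int) : Decidable (Spec_neighborhood_sum row col board out) := by unfold Spec_neighborhood_sum; infer_instance

-- ===== CLAIM (what is proved, stated in full; the proofs are below) =====
def Claim_equal_neighborhood_sum : Prop := ∀ (row : Int) (col : Int) (board : List (List Int)), Dom_neighborhood_sum row col board → Pre_neighborhood_sum row col board → Spec_neighborhood_sum row col board (neighborhood_sum row col board)


-- ===== LEMMAS AND PROOFS =====

-- One DELTA loop over x-1, x, x+1 with a [0, n) bounds test is the sum of g over the
-- clamped window range [max 0 (x-1), min n (x+2)).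
lemma window_sum (x n : Int) (hn : 0 ≤ n) (g : Int → Int) (t : Int) :
    List.foldl (fun s d => if 0 ≤ x + d ∧ x + d < n then s + g (x + d) else s) t [(-1 : Int), 0, 1]
      = t + ((PySem.List.pyRange (max 0 (x - 1)) (min n (x + 2)) 1).map g).sum := by
  have e1 : x + (-1) = x - 1 := by ring
  have e0 : x + 0 = x := by ring
  simp only [List.foldl, e1, e0]
  split_ifs with h1 h2 h3 h3 h2 h3 h3 <;> try (exfalso; omega)
  · rw [show max 0 (x-1) = x - 1 by omega, show min n (x+2) = x + 2 by omega,
      PySem.List.pyRange_one_cons (by omega), PySem.List.pyRange_one_cons (by omega),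
      PySem.List.pyRange_one_cons (by omega), PySem.List.pyRange_one_eq_nil (by omega)]
    simp [show x - 1 + 1 = x by ring]; ring
  · rw [show max 0 (x-1) = x by omega, show min n (x+2) = x + 2 by omega,
      PySem.List.pyRange_one_cons (by omega), PySem.List.pyRange_one_cons (by omega),
      PySem.List.pyRange_one_eq_nil (by omega)]
    simp; try ring
  · rw [show max 0 (x-1) = x + 1 by omega, show min n (x+2) = x + 2 by omega,
      PySem.List.pyRange_one_cons (by omega), PySem.List.pyRange_one_eq_nil (by omega)]
    simp; try ring
  · rw [show max 0 (x-1) = x - 1 by omega, show min n (x+2) = x + 1 by omega,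
      PySem.List.pyRange_one_cons (by omega), PySem.List.pyRange_one_cons (by omega),
      PySem.List.pyRange_one_eq_nil (by omega)]
    simp [show x - 1 + 1 = x by ring]; ring
  · rw [show max 0 (x-1) = x by omega, show min n (x+2) = x + 1 by omega,
      PySem.List.pyRange_one_cons (by omega), PySem.List.pyRange_one_eq_nil (by omega)]
    simp; try ring
  · rw [show max 0 (x-1) = x - 1 by omega, show min n (x+2) = x by omega,
      PySem.List.pyRange_one_cons (by omega), PySem.List.pyRange_one_eq_nil (by omega)]
    simp; try ring
  · rw [PySem.List.pyRange_one_eq_nil (by omega)]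
    simp

-- A slice with nonnegative in-range bounds is the map of pyGetD over the index range.
lemma slice_eq_map_pyRange {α : Type} (d : α) (l : List α) (a b : Int)
    (ha : 0 ≤ a) (hb0 : 0 ≤ b) (hb : b ≤ (l.length : Int)) :
    PySem.List.slice l (some a) (some b) = (PySem.List.pyRange a b 1).map (fun i => PySem.List.pyGetD l i d) := by
  by_cases hab : b ≤ a
  · rw [PySem.List.pyRange_one_eq_nil hab, PySem.List.slice_toNat l ha hb0]
    simp
    omega
  · have h := PySem.List.map_pyGetD_pyRange' (xs := l) (a := a) (d := d) ha
    rw [PySem.List.pyRange_one_append a b (l.length : Int) (by omega) hb, List.map_append] at h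
    rw [PySem.List.slice_toNat l ha hb0]
    have hlen : ((PySem.List.pyRange a b 1).map (fun i => PySem.List.pyGetD l i d)).length = b.toNat - a.toNat := by
      simp [PySem.List.length_pyRange_one]; omega
    rw [← h, ← hlen, List.take_left]

lemma pyRange_max_zero (a b : Int) (ha : 0 ≤ a) :
    PySem.List.pyRange a (max 0 b) 1 = PySem.List.pyRange a b 1 := by
  by_cases hb : 0 ≤ b
  · rw [max_eq_right hb]
  · rw [PySem.List.pyRange_one_eq_nil (by omega), PySem.List.pyRange_one_eq_nil (by omega)]

-- A's nine conditional additions are the double sum over the clamped window rectangle.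
lemma A_canon (row col : Int) (board : List (List Int)) :
    neighborhood_sum row col board
      = ((PySem.List.pyRange (max 0 (row - 1)) (max 0 (min (board.length : Int) (row + 2))) 1).map
          (fun r => ((PySem.List.pyRange (max 0 (col - 1)) (max 0 (min ((board.headD []).length : Int) (col + 2))) 1).map
            (fun c => PySem.List.pyGetD (PySem.List.pyGetD board r []) c 0)).sum)).sum := by
  have hinner : ∀ (t dy : Int),
      List.foldl (fun total dx =>
        if 0 ≤ row + dy ∧ row + dy < (board.length : Int) ∧
            0 ≤ col + dx ∧ col + dx < ((board.headD []).length : Int) then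
          total + PySem.List.pyGetD (PySem.List.pyGetD board (row + dy) []) (col + dx) 0
        else total) t [(-1 : Int), 0, 1]
      = if 0 ≤ row + dy ∧ row + dy < (board.length : Int) then
          t + ((PySem.List.pyRange (max 0 (col - 1)) (min ((board.headD []).length : Int) (col + 2)) 1).map
            (fun c => PySem.List.pyGetD (PySem.List.pyGetD board (row + dy) []) c 0)).sum
        else t := by
    intro t dy
    by_cases hr : 0 ≤ row + dy ∧ row + dy < (board.length : Int)
    · rw [if_pos hr]
      have h1 := hr.1; have h2 := hr.2
      simp only [h1, h2, true_and]
      exact window_sum col ((board.headD []).length : Int) (by positivity)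
        (fun c => PySem.List.pyGetD (PySem.List.pyGetD board (row + dy) []) c 0) t
    · rw [if_neg hr]
      have hfalse : ∀ dx : Int, ¬(0 ≤ row + dy ∧ row + dy < (board.length : Int) ∧
          0 ≤ col + dx ∧ col + dx < ((board.headD []).length : Int)) := by
        intro dx hc; exact hr ⟨hc.1, hc.2.1⟩
      simp only [hfalse, if_false, List.foldl]
  rw [show neighborhood_sum row col board = List.foldl (fun total dy =>
      List.foldl (fun total dx =>
        if 0 ≤ row + dy ∧ row + dy < (board.length : Int) ∧
            0 ≤ col + dx ∧ col + dx < ((board.headD []).length : Int) then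
          total + PySem.List.pyGetD (PySem.List.pyGetD board (row + dy) []) (col + dx) 0
        else total) total [(-1 : Int), 0, 1]) 0 [(-1 : Int), 0, 1] from rfl]
  simp only [hinner]
  have := window_sum row (board.length : Int) (by positivity)
    (fun r => ((PySem.List.pyRange (max 0 (col - 1)) (min ((board.headD []).length : Int) (col + 2)) 1).map
      (fun c => PySem.List.pyGetD (PySem.List.pyGetD board r []) c 0)).sum) 0
  simp only [List.foldl] at this ⊢
  rw [this, zero_add,
    pyRange_max_zero (max 0 (row - 1)) (min (board.length : Int) (row + 2)) (le_max_left 0 (row - 1)),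
    pyRange_max_zero (max 0 (col - 1)) (min ((board.headD []).length : Int) (col + 2)) (le_max_left 0 (col - 1))]

-- ===== VERDICT (by name: the statement is the Claim_ definition above) =====
theorem neighborhood_sum_spec : Claim_equal_neighborhood_sum := by
  intro row col board _ hpre
  unfold Spec_neighborhood_sum
  rw [A_canon]
  by_cases hnil : board = []
  · subst hnil
    simp only [neighborhood_sum_alt]
    rw [PySem.List.pyRange_one_eq_nil (by simp)]
    simp
  · simp only [neighborhood_sum_alt, if_neg hnil]
    rw [slice_eq_map_pyRange ([] : List Int) board (max 0 (row - 1))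
      (max 0 (min (board.length : Int) (row + 2))) (by omega) (by omega) (by omega),
      List.map_map]
    refine (congrArg List.sum (List.map_congr_left ?_)).symm
    intro i hi
    simp only [Function.comp]
    rw [PySem.List.mem_pyRange_one] at hi
    have hi2 : min ((board.headD []).length : Int) (col + 2) ≤
        max (max 0 (col - 1)) ((PySem.List.pyGetD board i []).length : Int) := by
      exact hpre i (PySem.List.mem_pyRange_one.mpr ⟨hi.1, by omega⟩)
    by_cases hcc : max 0 (col - 1) < min ((board.headD []).length : Int) (col + 2)
    · rw [slice_eq_map_pyRange (0 : Int) (PySem.List.pyGetD board i []) (max 0 (col - 1))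
        (max 0 (min ((board.headD []).length : Int) (col + 2))) (by omega) (by omega) (by omega)]
    · rw [PySem.List.slice_toNat _ (by omega) (by omega),
        show (max 0 (min ((board.headD []).length : Int) (col + 2))).toNat - (max 0 (col - 1)).toNat = 0 by omega,
        PySem.List.pyRange_one_eq_nil (by omega)]
      simp
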